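-- pv_equiv track=rewrite | github.com/logflux/amulog | amulog/external/mod_tplseq.py | _get_word_span
-- ===== SOURCE A (Python) =====
-- def _get_word_span(l_tpl_w, l_tpl_s):
--     ws = []
--     place = len(l_tpl_s[0])
--     for w, s in zip(l_tpl_w, l_tpl_s[1:]):
--         place_next = place + len(w)
--         ws.append((place, place_next))
--         place_next += len(s)
--         place = place_next
--     return ws
-- ===== SOURCE B (Python) =====
-- def _get_word_span(l_tpl_w, l_tpl_s):
--     pairs = list(zip(l_tpl_w, l_tpl_s[1:]))
--     offs = [len(l_tpl_s[0])]
--     for w, s in pairs: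
--         offs.append(offs[-1] + len(w) + len(s))
--     return [(o, o + len(w)) for o, (w, _) in zip(offs, pairs)]
-- ===== Notes on version B (the rewrite author's own statement) =====
-- stated objective: alternative
-- what changed: B first builds a cumulative start-offset table (prefix sums of word+separator lengths) and then extracts each span from the table in a separate pass, instead of threading a running accumulator that emits spans inside one loop.
import Mathlib
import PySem

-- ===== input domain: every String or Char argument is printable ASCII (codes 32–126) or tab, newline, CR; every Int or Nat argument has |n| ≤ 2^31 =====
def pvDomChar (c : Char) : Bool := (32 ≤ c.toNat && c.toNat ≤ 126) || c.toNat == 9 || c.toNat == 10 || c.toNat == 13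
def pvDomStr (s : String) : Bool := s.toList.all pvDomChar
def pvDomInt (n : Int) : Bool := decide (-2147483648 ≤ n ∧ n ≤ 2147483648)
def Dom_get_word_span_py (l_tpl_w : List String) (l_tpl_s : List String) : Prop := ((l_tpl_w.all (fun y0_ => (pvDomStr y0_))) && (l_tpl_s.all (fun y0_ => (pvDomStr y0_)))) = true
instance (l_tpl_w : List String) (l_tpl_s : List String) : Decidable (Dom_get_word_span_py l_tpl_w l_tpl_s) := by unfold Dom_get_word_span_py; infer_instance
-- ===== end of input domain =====

-- B builds a cumulative offset table then extracts spans in a second pass (alternative decomposition, same O(n) cost).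


-- ===== PORT A =====
def get_word_span_py (l_tpl_w : List String) (l_tpl_s : List String) : List (Int × Int) :=
  let place : Int := PySem.Str.len ((PySem.List.pyGet? l_tpl_s 0).getD "")
  ((l_tpl_w.zip (PySem.List.slice l_tpl_s (some 1) none)).foldl
    (fun (st : List (Int × Int) × Int) ws =>
      let place_next := st.2 + PySem.Str.len ws.1
      (st.1 ++ [(st.2, place_next)], place_next + PySem.Str.len ws.2))
    ([], place)).1

-- ===== PORT B =====
def get_word_span_py_alt (l_tpl_w : List String) (l_tpl_s : List String) : List (Int × Int) :=
  let pairs := l_tpl_w.zip (PySem.List.slice l_tpl_s (some 1) none)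
  let offs := pairs.foldl
    (fun offs p => offs ++ [PySem.List.pyGetD offs (-1) 0 + PySem.Str.len p.1 + PySem.Str.len p.2])
    [PySem.Str.len ((PySem.List.pyGet? l_tpl_s 0).getD "")]
  (offs.zip pairs).map (fun op => (op.1, op.1 + PySem.Str.len op.2.1))

-- ===== PRECONDITION & SPEC =====
-- Pre_ excludes only l_tpl_s = [], on which A raises IndexError (l_tpl_s[0]); B raises there too.
def Pre_get_word_span_py (l_tpl_w : List String) (l_tpl_s : List String) : Prop := l_tpl_s ≠ []
instance (l_tpl_w : List String) (l_tpl_s : List String) : Decidable (Pre_get_word_span_py l_tpl_w l_tpl_s) := by unfold Pre_get_word_span_py; infer_instance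
def pvWitness_get_word_span_py : List String × List String := (["ab", "cd"], ["<", " ", ">"])
def Spec_get_word_span_py (l_tpl_w : List String) (l_tpl_s : List String) (out : List (Int × Int)) : Prop := out = get_word_span_py_alt l_tpl_w l_tpl_s
instance (l_tpl_w : List String) (l_tpl_s : List String) (out : List (Int × Int)) : Decidable (Spec_get_word_span_py l_tpl_w l_tpl_s out) := by unfold Spec_get_word_span_py; infer_instance

-- ===== CLAIM (what is proved, stated in full; the proofs are below) =====
def Claim_equal_get_word_span_py : Prop := ∀ (l_tpl_w : List String) (l_tpl_s : List String), Dom_get_word_span_py l_tpl_w l_tpl_s → Pre_get_word_span_py l_tpl_w l_tpl_s → Spec_get_word_span_py l_tpl_w l_tpl_s (get_word_span_py l_tpl_w l_tpl_s)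

-- ===== LEMMAS AND PROOFS =====

/-- Reference spec: spans of a pair list starting at offset `p`. -/
def pvSpans (p : Int) : List (String × String) → List (Int × Int)
  | [] => []
  | (w, s) :: t => (p, p + PySem.Str.len w) :: pvSpans (p + PySem.Str.len w + PySem.Str.len s) t

/-- Offsets after the first, starting from last offset `p`. -/
def pvTailOffs (p : Int) : List (String × String) → List Int
  | [] => []
  | (w, s) :: t =>
    (p + PySem.Str.len w + PySem.Str.len s) :: pvTailOffs (p + PySem.Str.len w + PySem.Str.len s) t

theorem pvA_fold (l : List (String × String)) :
    ∀ (acc : List (Int × Int)) (p : Int),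
    (l.foldl (fun (st : List (Int × Int) × Int) ws =>
        let place_next := st.2 + PySem.Str.len ws.1
        (st.1 ++ [(st.2, place_next)], place_next + PySem.Str.len ws.2)) (acc, p)).1
      = acc ++ pvSpans p l := by
  induction l with
  | nil => intro acc p; simp [pvSpans]
  | cons h t ih =>
    intro acc p
    obtain ⟨w, s⟩ := h
    simp only [List.foldl, pvSpans, ih]
    simp [add_assoc]

theorem pvB_fold (l : List (String × String)) :
    ∀ (acc : List Int) (p : Int), acc ≠ [] → PySem.List.pyGetD acc (-1) 0 = p →
    l.foldl (fun offs pr =>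
        offs ++ [PySem.List.pyGetD offs (-1) 0 + PySem.Str.len pr.1 + PySem.Str.len pr.2]) acc
      = acc ++ pvTailOffs p l := by
  induction l with
  | nil => intro acc p _ _; simp [pvTailOffs]
  | cons h t ih =>
    intro acc p hne hlast
    obtain ⟨w, s⟩ := h
    simp only [List.foldl, pvTailOffs, hlast]
    rw [ih (acc ++ [p + PySem.Str.len w + PySem.Str.len s]) (p + PySem.Str.len w + PySem.Str.len s)
      (by simp) (by rw [PySem.List.pyGetD_neg_one_append_singleton])]
    simp

theorem pvZipMap (l : List (String × String)) :
    ∀ (p : Int),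
    ((p :: pvTailOffs p l).zip l).map
        (fun op : Int × (String × String) => (op.1, op.1 + PySem.Str.len op.2.1))
      = pvSpans p l := by
  induction l with
  | nil => intro p; simp [pvSpans]
  | cons h t ih =>
    intro p
    obtain ⟨w, s⟩ := h
    simp only [pvTailOffs, pvSpans, List.zip_cons_cons, List.map_cons]
    exact congrArg _ (ih _)

-- ===== VERDICT (by name: the statement is the Claim_ definition above) =====
theorem get_word_span_py_spec : Claim_equal_get_word_span_py := by
  intro l_tpl_w l_tpl_s _ _
  unfold Spec_get_word_span_py get_word_span_py get_word_span_py_alt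
  simp only
  rw [pvA_fold,
    pvB_fold _ _ (PySem.Str.len ((PySem.List.pyGet? l_tpl_s 0).getD "")) (by simp)
      (by simp [PySem.List.pyGetD, PySem.List.pyIdx?, PySem.List.pyGet?])]
  rw [List.singleton_append, pvZipMap]
  simp
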